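-- pv_equiv track=rewrite | github.com/n-k-t/dmap | overhaul/lazy.py | check_contiguous
-- ===== SOURCE A (Python) =====
-- def check_contiguous(
--
--         stride: list[int],
--         shape: list[int]
--     ) -> bool:
--     if not stride[-1] == 1:
--         return False
--     if not all((stride[i - 1] == (stride[i] * shape[i])) for i in range(len(stride) - 1, 0, -1)):
--         return False
--     return True
-- ===== SOURCE B (Python) =====
-- def check_contiguous(
--
--         stride: list[int],
--         shape: list[int]
--     ) -> bool:
--     acc = 1
--     for i in range(len(stride) - 1, 0, -1):
--         if stride[i] != acc:
--             return False
--         acc *= shape[i]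
--     return len(stride) > 0 and stride[0] == acc
-- ===== Notes on version B (the rewrite author's own statement) =====
-- stated objective: alternative
-- what changed: Replaces the separate stride[-1]==1 guard plus pairwise adjacent check stride[i-1]==stride[i]*shape[i] with a single backward loop maintaining a running-product accumulator of trailing shape dims and comparing each stride entry to it.
import Mathlib
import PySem

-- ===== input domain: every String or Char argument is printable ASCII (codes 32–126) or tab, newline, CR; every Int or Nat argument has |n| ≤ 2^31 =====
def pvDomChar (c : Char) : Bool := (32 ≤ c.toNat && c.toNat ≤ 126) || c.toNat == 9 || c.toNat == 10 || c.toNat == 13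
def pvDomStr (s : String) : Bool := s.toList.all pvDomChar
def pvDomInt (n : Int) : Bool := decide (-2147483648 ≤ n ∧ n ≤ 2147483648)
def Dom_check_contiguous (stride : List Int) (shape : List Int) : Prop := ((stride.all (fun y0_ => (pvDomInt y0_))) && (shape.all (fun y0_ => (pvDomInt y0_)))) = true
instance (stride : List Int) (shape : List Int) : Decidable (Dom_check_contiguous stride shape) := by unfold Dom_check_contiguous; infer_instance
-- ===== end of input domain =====

-- B replaces A's stride[-1]==1 guard plus pairwise check stride[i-1]==stride[i]*shape[i]
-- by one backward loop maintaining a running product of trailing shape dims (objective: alternative;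
-- same O(n) cost). Return-value equivalence only; neither version mutates its arguments.

-- ===== PORT A =====
def check_contiguous (stride : List Int) (shape : List Int) : Bool :=
  if !(PySem.List.pyGetD stride (-1) 0 == 1) then false
  else if !((PySem.List.pyRange ((stride.length : Int) - 1) 0 (-1)).all fun i =>
      PySem.List.pyGetD stride (i - 1) 0 == PySem.List.pyGetD stride i 0 * PySem.List.pyGetD shape i 0) then false
  else true

-- ===== PORT B =====
-- the 'for i in range(len(stride)-1, 0, -1)' loop of Source B with early return
def cc_loop (stride shape : List Int) : List Int → Int → Bool
  | [], acc => decide (0 < stride.length) && (PySem.List.pyGetD stride 0 0 == acc)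
  | i :: rest, acc =>
      if PySem.List.pyGetD stride i 0 != acc then false
      else cc_loop stride shape rest (acc * PySem.List.pyGetD shape i 0)

def check_contiguous_alt (stride : List Int) (shape : List Int) : Bool :=
  cc_loop stride shape (PySem.List.pyRange ((stride.length : Int) - 1) 0 (-1)) 1

-- ===== PRECONDITION & SPEC =====
-- Pre_ excludes exactly the inputs on which A raises IndexError: an empty stride
-- (stride[-1]), and a stride ending in 1 with ≥ 2 entries but a shorter shape
-- (the generator indexes shape[len(stride)-1]).
def Pre_check_contiguous (stride : List Int) (shape : List Int) : Prop :=
  stride ≠ [] ∧ (stride.getLast? = some 1 → stride.length ≤ 1 ∨ stride.length ≤ shape.length)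
instance (stride : List Int) (shape : List Int) : Decidable (Pre_check_contiguous stride shape) := by unfold Pre_check_contiguous; infer_instance
def pvWitness_check_contiguous : List Int × List Int := ([6, 2, 1], [2, 3, 2])

def Spec_check_contiguous (stride : List Int) (shape : List Int) (out : Bool) : Prop := out = check_contiguous_alt stride shape
instance (stride : List Int) (shape : List Int) (out : Bool) : Decidable (Spec_check_contiguous stride shape out) := by unfold Spec_check_contiguous; infer_instance

-- ===== CLAIM (what is proved, stated in full; the proofs are below) =====
def Claim_equal_check_contiguous : Prop := ∀ (stride : List Int) (shape : List Int), Dom_check_contiguous stride shape → Pre_check_contiguous stride shape → Spec_check_contiguous stride shape (check_contiguous stride shape)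

-- ===== LEMMAS AND PROOFS =====

-- B's loop over the countdown range [k, k-1, …, 1], started with accumulator a, equals
-- "stride[k] == a" conjoined with A's pairwise checks over the same range.
lemma cc_loop_eq (stride shape : List Int) (hs : stride ≠ []) (k : Nat) (a : Int) :
    cc_loop stride shape (PySem.List.pyRange (k : Int) 0 (-1)) a
      = ((PySem.List.pyGetD stride (k : Int) 0 == a) &&
         (PySem.List.pyRange (k : Int) 0 (-1)).all fun i =>
            PySem.List.pyGetD stride (i - 1) 0 == PySem.List.pyGetD stride i 0 * PySem.List.pyGetD shape i 0) := by
  induction k generalizing a with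
  | zero =>
      rw [PySem.List.pyRange_neg_one_eq_nil (by omega)]
      simp [cc_loop, List.length_pos_iff, hs]
  | succ k ih =>
      rw [PySem.List.pyRange_neg_one_cons (by omega : (0:Int) < (k+1 : Nat))]
      have hcast : ((k+1 : Nat) : Int) - 1 = (k : Int) := by push_cast; ring
      simp only [cc_loop, List.all_cons, hcast]
      push_cast
      by_cases h : PySem.List.pyGetD stride ((k : Int) + 1) 0 = a
      · simp [h, ih]
      · simp [h]

theorem check_contiguous_spec : Claim_equal_check_contiguous := by
  intro stride shape _ hpre
  obtain ⟨hs, -⟩ := hpre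
  unfold Spec_check_contiguous check_contiguous check_contiguous_alt
  have hn : 1 ≤ stride.length := List.length_pos_iff.mpr hs
  have hcast : ((stride.length : Int) - 1) = ((stride.length - 1 : Nat) : Int) := by omega
  rw [hcast, cc_loop_eq stride shape hs]
  have hlast : PySem.List.pyGetD stride (-1) 0 = PySem.List.pyGetD stride ((stride.length - 1 : Nat) : Int) 0 := by
    rw [PySem.List.pyGetD_neg_one stride 0 hs, PySem.List.pyGetD_natCast]
    rw [List.getLast_eq_getElem]
    rw [List.getD_eq_getElem stride 0 (by omega)]
  rw [hlast]
  cases h1 : (PySem.List.pyGetD stride ((stride.length - 1 : Nat) : Int) 0 == 1) <;>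
    cases h2 : ((PySem.List.pyRange ((stride.length - 1 : Nat) : Int) 0 (-1)).all fun i =>
        PySem.List.pyGetD stride (i - 1) 0 == PySem.List.pyGetD stride i 0 * PySem.List.pyGetD shape i 0) <;>
    simp [h1, h2]
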